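-- pv_equiv track=rewrite | github.com/GACWR/OpenUBA | core/tests/e2e/test_workspace_notebooks.py | check_for_fatal_errors
-- ===== SOURCE A (Python) =====
-- FATAL_ERROR_PATTERNS = [
--     "syntaxerror",
--     "indentationerror",
--     "nameerror",
--     "typeerror: ",  # with space to avoid matching "typeerror" in descriptions
--     "attributeerror",
--     "modulenotfounderror",
--     "importerror",
--     "filenotfounderror",
--     "zerodivisionerror",
--     "keyerror",
--     "valueerror: unsupported",
--     "traceback (most recent call last)",
-- ]
--
-- def check_for_fatal_errors(outputs: list) -> list:
--     '''
--     check notebook outputs for fatal Python errors.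
--     returns list of error descriptions found.
--     API errors (HTTPError, ConnectionError) are expected and NOT fatal.
--     '''
--     errors = []
--     full_output = "\n".join(outputs).lower()
--
--     for pattern in FATAL_ERROR_PATTERNS:
--         if pattern in full_output:
--             # find the actual line containing the error for reporting
--             for line in outputs:
--                 if pattern in line.lower():
--                     errors.append(line.strip())
--                     break
--     return errors
-- ===== SOURCE B (Python) =====
-- FATAL_ERROR_PATTERNS = [
--     "syntaxerror",
--     "indentationerror",
--     "nameerror",
--     "typeerror: ",  # with space to avoid matching "typeerror" in descriptions
--     "attributeerror",
--     "modulenotfounderror",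
--     "importerror",
--     "filenotfounderror",
--     "zerodivisionerror",
--     "keyerror",
--     "valueerror: unsupported",
--     "traceback (most recent call last)",
-- ]
--
-- def check_for_fatal_errors(outputs: list) -> list:
--     '''single pass: lowercase each line once, record the first line per pattern, emit in pattern order.'''
--     found = {}
--     for line in outputs:
--         low = line.lower()
--         for pattern in FATAL_ERROR_PATTERNS:
--             if pattern not in found and pattern in low:
--                 found[pattern] = line.strip()
--     return [found[p] for p in FATAL_ERROR_PATTERNS if p in found]
-- ===== Notes on version B (the rewrite author's own statement) =====
-- stated objective: alternative
-- what changed: Replaces A's join-and-lower precompute plus a full rescan of all lines for each of the 12 patterns with a single indexing pass over the lines that lowercases each line once and records the first matching stripped line per pattern in a dict, then emits in pattern order; same asymptotic cost.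
import Mathlib
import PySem

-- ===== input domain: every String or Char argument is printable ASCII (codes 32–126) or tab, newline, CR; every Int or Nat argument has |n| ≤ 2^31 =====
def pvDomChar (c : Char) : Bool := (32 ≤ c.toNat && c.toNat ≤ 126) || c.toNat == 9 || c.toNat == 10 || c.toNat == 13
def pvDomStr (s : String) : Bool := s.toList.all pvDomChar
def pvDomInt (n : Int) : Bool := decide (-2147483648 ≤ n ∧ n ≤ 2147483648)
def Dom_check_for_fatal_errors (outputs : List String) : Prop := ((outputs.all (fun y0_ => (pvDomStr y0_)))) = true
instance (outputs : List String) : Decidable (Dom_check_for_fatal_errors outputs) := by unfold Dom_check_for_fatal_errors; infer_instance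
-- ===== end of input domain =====

-- B replaces A's per-pattern rescans of all lines (plus the joined-and-lowered precompute)
-- with one pass over the lines that lowercases each line once and records the first matching
-- line per pattern in a dict, emitting in pattern order (objective: alternative decomposition).


def FATAL_ERROR_PATTERNS : List String :=
  ["syntaxerror", "indentationerror", "nameerror", "typeerror: ", "attributeerror",
   "modulenotfounderror", "importerror", "filenotfounderror", "zerodivisionerror",
   "keyerror", "valueerror: unsupported", "traceback (most recent call last)"]

-- ===== PORT A =====
-- A's inner 'for line in outputs: if pattern in line.lower(): errors.append(line.strip()); break'
def pvFirstMatchA (pattern : String) : List String → List String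
  | [] => []
  | line :: rest =>
    if PySem.Str.isIn pattern (PySem.Str.lower line) then [PySem.Str.strip line]
    else pvFirstMatchA pattern rest

def check_for_fatal_errors (outputs : List String) : List String :=
  let full_output := PySem.Str.lower (PySem.Str.join "\n" outputs)
  FATAL_ERROR_PATTERNS.foldl
    (fun errors pattern =>
      if PySem.Str.isIn pattern full_output then errors ++ pvFirstMatchA pattern outputs
      else errors) []

-- ===== PORT B =====
-- B's indexing pass: for each line (lowercased once) record the stripped line for each
-- pattern not yet in the dict that occurs in it.
def pvIndexB (outputs : List String) : PySem.Dict String String :=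
  outputs.foldl
    (fun found line =>
      let low := PySem.Str.lower line
      FATAL_ERROR_PATTERNS.foldl
        (fun found pattern =>
          if !(found.contains pattern) && PySem.Str.isIn pattern low then
            found.insert pattern (PySem.Str.strip line)
          else found) found)
    PySem.Dict.empty

def check_for_fatal_errors_alt (outputs : List String) : List String :=
  let found := pvIndexB outputs
  FATAL_ERROR_PATTERNS.foldl
    (fun errors pattern =>
      match found.get? pattern with
      | some v => errors ++ [v]
      | none => errors) []

-- ===== PRECONDITION & SPEC =====
def Spec_check_for_fatal_errors (outputs : List String) (out : List String) : Prop := out = check_for_fatal_errors_alt outputs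
instance (outputs : List String) (out : List String) : Decidable (Spec_check_for_fatal_errors outputs out) := by unfold Spec_check_for_fatal_errors; infer_instance

-- ===== CLAIM (what is proved, stated in full; the proofs are below) =====
def Claim_equal_check_for_fatal_errors : Prop := ∀ (outputs : List String), Dom_check_for_fatal_errors outputs → Spec_check_for_fatal_errors outputs (check_for_fatal_errors outputs)

-- ===== LEMMAS AND PROOFS =====

-- the per-line inner step of pvIndexB
def pvStep (line : String) (found : PySem.Dict String String) (pattern : String) : PySem.Dict String String :=
  if !(found.contains pattern) && PySem.Str.isIn pattern (PySem.Str.lower line) then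
    found.insert pattern (PySem.Str.strip line)
  else found

lemma pvStep_get?_untouched (line : String) (ps : List String) (p : String) (hp : p ∉ ps)
    (d : PySem.Dict String String) :
    (ps.foldl (pvStep line) d).get? p = d.get? p := by
  induction ps generalizing d with
  | nil => rfl
  | cons q ps ih =>
    simp only [List.mem_cons, not_or] at hp
    simp only [List.foldl_cons, ih hp.2]
    unfold pvStep
    split
    · exact PySem.Dict.get?_insert_of_ne _ _ hp.1
    · rfl

lemma pvStep_get?_mem (line : String) (ps : List String) (hnd : ps.Nodup) (p : String)
    (hp : p ∈ ps) (d : PySem.Dict String String) :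
    (ps.foldl (pvStep line) d).get? p =
      if (!(d.contains p) && PySem.Str.isIn p (PySem.Str.lower line)) = true then
        some (PySem.Str.strip line)
      else d.get? p := by
  induction ps generalizing d with
  | nil => cases hp
  | cons q ps ih =>
    rcases List.nodup_cons.mp hnd with ⟨hqps, hnd'⟩
    rcases List.mem_cons.mp hp with rfl | hp'
    · simp only [List.foldl_cons, pvStep_get?_untouched line ps p hqps]
      unfold pvStep
      split
      · exact PySem.Dict.get?_insert_self _ _ _
      · rfl
    · have hpq : p ≠ q := fun h => hqps (h ▸ hp')
      simp only [List.foldl_cons]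
      rw [ih hnd' hp']
      have hget : (pvStep line d q).get? p = d.get? p := by
        unfold pvStep; split
        · exact PySem.Dict.get?_insert_of_ne _ _ hpq
        · rfl
      have hcon : (pvStep line d q).contains p = d.contains p := by
        rw [PySem.Dict.contains_eq_isSome_get?, hget, ← PySem.Dict.contains_eq_isSome_get?]
      rw [hget, hcon]

-- the dict built by B holds, for each pattern, the strip of the first line containing it
lemma pvIndexB_get? (outputs : List String) (p : String) (hp : p ∈ FATAL_ERROR_PATTERNS)
    (d : PySem.Dict String String) :
    (outputs.foldl (fun found line => FATAL_ERROR_PATTERNS.foldl (pvStep line) found) d).get? p =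
      match d.get? p with
      | some v => some v
      | none =>
        (outputs.find? (fun l => PySem.Str.isIn p (PySem.Str.lower l))).map PySem.Str.strip := by
  have hnd : FATAL_ERROR_PATTERNS.Nodup := by decide
  induction outputs generalizing d with
  | nil => cases h : d.get? p <;> simp [h]
  | cons line rest ih =>
    simp only [List.foldl_cons]
    rw [ih]
    rw [pvStep_get?_mem line FATAL_ERROR_PATTERNS hnd p hp d]
    cases hd : d.get? p with
    | some v =>
      have hc : d.contains p = true := by
        rw [PySem.Dict.contains_eq_isSome_get?, hd]; rfl
      simp [hc]
    | none =>
      have hc : d.contains p = false := by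
        rw [PySem.Dict.contains_eq_isSome_get?, hd]; rfl
      by_cases hin : PySem.Str.isIn p (PySem.Str.lower line) = true
      · rw [List.find?_cons_of_pos (p := fun l => PySem.Str.isIn p (PySem.Str.lower l)) hin]
        simp only [pysem] at hin
        simp [hc, hin, PySem.Chars.isIn_iff_infix]
      · rw [List.find?_cons_of_neg (p := fun l => PySem.Str.isIn p (PySem.Str.lower l)) hin]
        simp only [pysem] at hin
        simp [hc, hin, PySem.Chars.isIn_iff_infix]

lemma pvFirstMatchA_eq_find? (p : String) (outputs : List String) :
    pvFirstMatchA p outputs =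
      match outputs.find? (fun l => PySem.Str.isIn p (PySem.Str.lower l)) with
      | some l => [PySem.Str.strip l]
      | none => [] := by
  induction outputs with
  | nil => rfl
  | cons line rest ih =>
    unfold pvFirstMatchA
    by_cases h : PySem.Str.isIn p (PySem.Str.lower line) = true
    · rw [if_pos h, List.find?_cons_of_pos (p := fun l => PySem.Str.isIn p (PySem.Str.lower l)) h]
    · rw [if_neg h, List.find?_cons_of_neg (p := fun l => PySem.Str.isIn p (PySem.Str.lower l)) h]
      exact ih

-- every member of a join is an infix of the join
lemma pvInfix_join (sep : List Char) (parts : List (List Char)) (c : List Char) (hc : c ∈ parts) :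
    c <:+: PySem.Chars.join sep parts := by
  induction parts with
  | nil => cases hc
  | cons a parts ih =>
    cases parts with
    | nil =>
      rcases List.mem_singleton.mp hc with rfl
      rw [PySem.Chars.join_singleton]
    | cons b rest =>
      rw [PySem.Chars.join_cons_cons]
      rcases List.mem_cons.mp hc with rfl | hc'
      · exact ((List.prefix_append c _).trans (List.prefix_append _ _)).isInfix
      · exact (ih hc').trans (List.suffix_append _ _).isInfix

-- a pattern found in some line is found in the lowered join (A's outer guard fires)
lemma pvGuard_of_line (p line : String) (outputs : List String) (hline : line ∈ outputs)
    (h : PySem.Str.isIn p (PySem.Str.lower line) = true) :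
    PySem.Str.isIn p (PySem.Str.lower (PySem.Str.join "\n" outputs)) = true := by
  rw [PySem.Str.isIn_iff_infix] at h ⊢
  simp only [PySem.Str.toList_lower, PySem.Str.toList_join] at h ⊢
  refine h.trans ?_
  have hmem : line.toList ∈ outputs.map String.toList := List.mem_map_of_mem hline
  have hinf : line.toList <:+: PySem.Chars.join "\n".toList (outputs.map String.toList) :=
    pvInfix_join _ _ _ hmem
  show PySem.Chars.lower line.toList <:+: PySem.Chars.lower (PySem.Chars.join "\n".toList (outputs.map String.toList))
  exact hinf.map (PySem.Chars.lowerChar)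

-- ===== VERDICT (by name: the statement is the Claim_ definition above) =====
theorem check_for_fatal_errors_spec : Claim_equal_check_for_fatal_errors := by
  intro outputs _
  show check_for_fatal_errors outputs = check_for_fatal_errors_alt outputs
  simp only [check_for_fatal_errors, check_for_fatal_errors_alt, pvIndexB]
  refine PySem.List.foldl_congr_mem _ _ _ _ (fun errors p hp => ?_)
  have hB : (outputs.foldl
      (fun found line => FATAL_ERROR_PATTERNS.foldl (pvStep line) found) PySem.Dict.empty).get? p =
      (outputs.find? (fun l => PySem.Str.isIn p (PySem.Str.lower l))).map PySem.Str.strip := by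
    rw [pvIndexB_get? outputs p hp PySem.Dict.empty]; rfl
  have hstep : (fun (found : PySem.Dict String String) (line : String) =>
      FATAL_ERROR_PATTERNS.foldl
        (fun found pattern =>
          if !(found.contains pattern) && PySem.Str.isIn pattern (PySem.Str.lower line) then
            found.insert pattern (PySem.Str.strip line)
          else found) found) =
      (fun found line => FATAL_ERROR_PATTERNS.foldl (pvStep line) found) := rfl
  rw [hstep, hB, pvFirstMatchA_eq_find? p outputs]
  cases hf : outputs.find? (fun l => PySem.Str.isIn p (PySem.Str.lower l)) with
  | some l =>
    have hmem : l ∈ outputs := List.mem_of_find?_eq_some hf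
    have hl : PySem.Str.isIn p (PySem.Str.lower l) = true := by
      simpa using List.find?_some hf
    rw [if_pos (pvGuard_of_line p l outputs hmem hl)]
    rfl
  | none =>
    simp
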